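-- pv_equiv track=rewrite | github.com/qwertystop/cardcounter | games/seven_twentyseven.py | branch_value_by_aces
-- ===== SOURCE A (Python) =====
-- def branch_value_by_aces(base, num_aces):
--     """Calculate totals for each possible value of aces, return the best total.
--     Naive solution, may not be actual best on multiple aces."""
--     if num_aces == 0:
--         return base
--     elif num_aces < 0:
--         raise ValueError("Negative number of aces?!")
--     else:
--         high = branch_value_by_aces(base + 11, num_aces - 1)
--         low = branch_value_by_aces(base + 1, num_aces - 1)
--         if rate_score(high)[0] < rate_score(low)[0]:
--             return high
--         else:
--             return low
--
-- def rate_score(score, force_direction=0):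
--     """Scores rated by lower of distance to 7 or 27.
--     Can force rating by comparison to 7 (pass negative) or 27 (pass positive)"""
--     sevenscore = abs(7 - score)
--     twentysevenscore = abs(27 - score)
--     if force_direction < 0:
--         return sevenscore, -1
--     elif force_direction > 0:
--         return twentysevenscore, 1
--     else:
--         return min(sevenscore, twentysevenscore), (sevenscore - twentysevenscore)
-- ===== SOURCE B (Python) =====
-- def branch_value_by_aces(base, num_aces):
--     """Best total over ace valuations: every outcome is base + num_aces + 10*k
--     (k = number of aces counted as 11), so scan the num_aces + 1 candidates
--     once and keep the first one with the lowest rating."""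
--     best = base + num_aces
--     best_rate = min(abs(7 - best), abs(27 - best))
--     for k in range(1, num_aces + 1):
--         v = base + num_aces + 10 * k
--         r = min(abs(7 - v), abs(27 - v))
--         if r < best_rate:
--             best, best_rate = v, r
--     return best
-- ===== Notes on version B (the rewrite author's own statement) =====
-- stated objective: faster
-- what changed: Replaces the exponential binary recursion over ace choices by a single linear scan of the num_aces+1 distinct candidate totals base+num_aces+10*k, keeping the first with minimal rating; intended as faster (timing: A timed out at num_aces=16 where B returned, ratio unmeasurable at sizes both finish).
import Mathlib
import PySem

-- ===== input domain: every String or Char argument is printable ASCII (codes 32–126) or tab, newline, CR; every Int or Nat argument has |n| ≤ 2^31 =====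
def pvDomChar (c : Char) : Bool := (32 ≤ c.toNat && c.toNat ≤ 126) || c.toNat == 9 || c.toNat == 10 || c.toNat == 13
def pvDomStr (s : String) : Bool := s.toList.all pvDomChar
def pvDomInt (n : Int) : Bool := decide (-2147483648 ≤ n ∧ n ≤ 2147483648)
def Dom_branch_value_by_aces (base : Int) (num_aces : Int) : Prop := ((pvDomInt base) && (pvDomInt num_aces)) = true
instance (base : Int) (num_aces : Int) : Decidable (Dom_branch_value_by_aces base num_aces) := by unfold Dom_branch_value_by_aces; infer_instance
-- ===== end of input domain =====

-- B replaces A's binary recursion over ace choices by one linear scan over the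
-- num_aces+1 distinct candidate totals base+num_aces+10*k; intended as faster
-- (measured: A timed out at num_aces=16 where B returned; no ratio at smaller sizes).

-- ===== PORT A =====
def rate_score (score : Int) (force_direction : Int) : Int × Int :=
  let sevenscore := |7 - score|
  let twentysevenscore := |27 - score|
  if force_direction < 0 then (sevenscore, -1)
  else if force_direction > 0 then (twentysevenscore, 1)
  else (min sevenscore twentysevenscore, sevenscore - twentysevenscore)

def branch_value_by_aces (base : Int) (num_aces : Int) : Int :=
  if num_aces = 0 then base
  else if num_aces < 0 then base  -- Python raises ValueError here; excluded by Pre_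
  else
    let high := branch_value_by_aces (base + 11) (num_aces - 1)
    let low := branch_value_by_aces (base + 1) (num_aces - 1)
    if (rate_score high 0).1 < (rate_score low 0).1 then high else low
termination_by num_aces.toNat
decreasing_by all_goals omega

-- ===== PORT B =====
def bStep (c : Int) (st : Int × Int) (k : Int) : Int × Int :=
  let v := c + 10 * k
  let r := min |7 - v| |27 - v|
  if r < st.2 then (v, r) else st

def branch_value_by_aces_alt (base : Int) (num_aces : Int) : Int :=
  let best := base + num_aces
  let best_rate := min |7 - best| |27 - best|
  ((PySem.List.pyRange 1 (num_aces + 1) 1).foldl (bStep (base + num_aces)) (best, best_rate)).1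

-- ===== PRECONDITION & SPEC =====
-- Pre_ excludes num_aces < 0, where Python A raises ValueError.
def Pre_branch_value_by_aces (base : Int) (num_aces : Int) : Prop := 0 ≤ num_aces
instance (base : Int) (num_aces : Int) : Decidable (Pre_branch_value_by_aces base num_aces) := by unfold Pre_branch_value_by_aces; infer_instance
def pvWitness_branch_value_by_aces : Int × Int := (7, 2)

def Spec_branch_value_by_aces (base : Int) (num_aces : Int) (out : Int) : Prop := out = branch_value_by_aces_alt base num_aces
instance (base : Int) (num_aces : Int) (out : Int) : Decidable (Spec_branch_value_by_aces base num_aces out) := by unfold Spec_branch_value_by_aces; infer_instance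

-- ===== CLAIM (what is proved, stated in full; the proofs are below) =====
def Claim_equal_branch_value_by_aces : Prop := ∀ (base : Int) (num_aces : Int), Dom_branch_value_by_aces base num_aces → Pre_branch_value_by_aces base num_aces → Spec_branch_value_by_aces base num_aces (branch_value_by_aces base num_aces)
-- ===== LEMMAS AND PROOFS =====

-- rating of a score (first component of rate_score with force_direction 0)
def rate (s : Int) : Int := min |7 - s| |27 - s|

-- A's recursion rewritten around the final total c = base + num_aces
def R (c : Int) : Nat → Int
  | 0 => c
  | m + 1 => if rate (R (c + 10) m) < rate (R c m) then R (c + 10) m else R c m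

theorem rate_score_fst (x : Int) : (rate_score x 0).1 = rate x := by
  simp [rate_score, rate]

theorem A_eq_R : ∀ (m : Nat) (base : Int), branch_value_by_aces base (m : Int) = R (base + m) m := by
  intro m
  induction m with
  | zero => intro base; rw [branch_value_by_aces]; simp [R]
  | succ m ih =>
    intro base
    rw [branch_value_by_aces]
    have h0 : ¬ ((m : Int) + 1 = 0) := by omega
    have h1 : ¬ ((m : Int) + 1 < 0) := by omega
    have h2 : ((m : Int) + 1) - 1 = (m : Int) := by ring
    push_cast
    simp only [h0, h1, if_false, h2, rate_score_fst]
    rw [ih (base + 11), ih (base + 1)]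
    have e1 : base + 11 + (m : Int) = (base + ((m : Int) + 1)) + 10 := by ring
    have e2 : base + 1 + (m : Int) = base + ((m : Int) + 1) := by ring
    rw [e1, e2]
    simp [R]

theorem cmp_assoc (t h l X : Int) (hX : X = if rate h < rate l then h else l) :
    (if rate (if rate t < rate h then t else h) < rate X then (if rate t < rate h then t else h) else X)
      = if rate t < rate X then t else X := by
  subst hX
  split_ifs <;> first | rfl | omega

theorem Rstep : ∀ (m : Nat) (c : Int), R c (m + 1) = if rate (c + 10 * ((m : Int) + 1)) < rate (R c m) then c + 10 * ((m : Int) + 1) else R c m := by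
  intro m
  induction m with
  | zero => intro c; norm_num [R]
  | succ m ih =>
    intro c
    have hdef : R c (m + 2) = if rate (R (c + 10) (m + 1)) < rate (R c (m + 1)) then R (c + 10) (m + 1) else R c (m + 1) := rfl
    have hdef' : R c (m + 1) = if rate (R (c + 10) m) < rate (R c m) then R (c + 10) m else R c m := rfl
    have h10 : (c + 10) + 10 * ((m : Int) + 1) = c + 10 * ((m : Int) + 1 + 1) := by ring
    rw [hdef, ih (c + 10), h10]
    push_cast
    exact cmp_assoc (c + 10 * ((m : Int) + 1 + 1)) (R (c + 10) m) (R c m) (R c (m + 1)) hdef'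

theorem B_fold : ∀ (m : Nat) (c : Int), (PySem.List.pyRange 1 ((m : Int) + 1) 1).foldl (bStep c) (c, rate c) = (R c m, rate (R c m)) := by
  intro m
  induction m with
  | zero =>
    intro c
    rw [PySem.List.pyRange_one_eq_nil (by omega)]
    simp [R]
  | succ m ih =>
    intro c
    have hsp : PySem.List.pyRange 1 ((m : Int) + 1 + 1) 1 = PySem.List.pyRange 1 ((m : Int) + 1) 1 ++ [(m : Int) + 1] := by
      exact PySem.List.pyRange_one_succ_right (by omega)
    push_cast
    rw [hsp, List.foldl_append, ih c]
    have hb : bStep c (R c m, rate (R c m)) ((m : Int) + 1) = if rate (c + 10 * ((m : Int) + 1)) < rate (R c m) then (c + 10 * ((m : Int) + 1), rate (c + 10 * ((m : Int) + 1))) else (R c m, rate (R c m)) := rfl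
    simp only [List.foldl_cons, List.foldl_nil]
    rw [hb, Rstep m c]
    split_ifs <;> rfl

theorem alt_eq_R (base : Int) (m : Nat) : branch_value_by_aces_alt base (m : Int) = R (base + m) m := by
  have h : branch_value_by_aces_alt base (m : Int) = ((PySem.List.pyRange 1 ((m : Int) + 1) 1).foldl (bStep (base + m)) (base + m, rate (base + m))).1 := rfl
  rw [h, B_fold m (base + m)]

-- ===== VERDICT (by name: the statement is the Claim_ definition above) =====
theorem branch_value_by_aces_spec : Claim_equal_branch_value_by_aces := by
  intro base num_aces _ hpre
  unfold Spec_branch_value_by_aces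
  obtain ⟨m, rfl⟩ := Int.eq_ofNat_of_zero_le hpre
  rw [A_eq_R m base, alt_eq_R base m]
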